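-- pv_equiv track=rewrite | github.com/BBuf/how-to-optim-algorithm-in-cuda | meagtron-lm/playground.py | generate_tensor_model_parallel_groups
-- ===== SOURCE A (Python) =====
-- def generate_tensor_model_parallel_groups(world_size, tensor_model_parallel_size):
--     """
--     Generate model parallel groups based on tensor model parallel size.
--     """
--     assert world_size % tensor_model_parallel_size == 0, "world_size must be divisible by tensor_model_parallel_size"
--     num_tensor_model_parallel_groups = world_size // tensor_model_parallel_size
--     tensor_model_parallel_group_ranks = []
--     for i in range(num_tensor_model_parallel_groups):
--         ranks = range(i * tensor_model_parallel_size, (i + 1) * tensor_model_parallel_size)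
--         tensor_model_parallel_group_ranks.append(list(ranks))
--     return tensor_model_parallel_group_ranks
-- ===== SOURCE B (Python) =====
-- def generate_tensor_model_parallel_groups(world_size, tensor_model_parallel_size):
--     """
--     Generate model parallel groups based on tensor model parallel size.
--     """
--     assert world_size % tensor_model_parallel_size == 0, "world_size must be divisible by tensor_model_parallel_size"
--     num = world_size // tensor_model_parallel_size
--     groups = [[] for _ in range(num)]
--     for r in range(world_size):
--         groups[r // tensor_model_parallel_size].append(r)
--     return groups
-- ===== Notes on version B (the rewrite author's own statement) =====
-- stated objective: alternative
-- what changed: Instead of building each group as a contiguous range per group index, B pre-creates num empty buckets and makes one flat pass over all ranks, scattering each rank r into bucket r // tensor_model_parallel_size.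
-- outside the precondition, e.g. on generate_tensor_model_parallel_groups(4, -2): A returns [], B raises IndexError
import Mathlib
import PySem

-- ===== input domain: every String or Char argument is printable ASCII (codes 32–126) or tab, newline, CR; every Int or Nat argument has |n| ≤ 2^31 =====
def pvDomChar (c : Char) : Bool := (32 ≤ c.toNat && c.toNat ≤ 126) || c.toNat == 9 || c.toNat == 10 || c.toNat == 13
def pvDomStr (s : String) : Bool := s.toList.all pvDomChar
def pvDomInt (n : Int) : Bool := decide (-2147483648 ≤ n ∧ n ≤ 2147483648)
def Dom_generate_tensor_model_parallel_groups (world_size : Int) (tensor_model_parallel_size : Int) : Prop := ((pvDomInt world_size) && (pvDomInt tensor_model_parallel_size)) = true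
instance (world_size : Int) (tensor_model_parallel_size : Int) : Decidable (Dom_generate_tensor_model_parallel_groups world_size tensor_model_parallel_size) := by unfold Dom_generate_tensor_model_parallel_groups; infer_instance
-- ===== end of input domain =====

-- B replaces A's per-group contiguous-range construction by a single per-rank scatter pass
-- into pre-created buckets (alternative decomposition, same cost).

-- ===== PORT A =====
-- The assert (world_size % tps == 0) raising, and tps == 0 (ZeroDivisionError), are excluded by Pre_.
def generate_tensor_model_parallel_groups (world_size : Int) (tensor_model_parallel_size : Int) : List (List Int) :=
  let num := PySem.Int.floordiv world_size tensor_model_parallel_size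
  (PySem.List.pyRange 0 num 1).foldl
    (fun acc i =>
      acc ++ [PySem.List.pyRange (i * tensor_model_parallel_size) ((i + 1) * tensor_model_parallel_size) 1])
    []

-- ===== PORT B =====
-- groups[r // tps].append(r): inside Pre_ the index r // tps is a nonnegative in-range index,
-- so `.toNat` + List.modify is exact there (no negative-index wraparound occurs).
def generate_tensor_model_parallel_groups_alt (world_size : Int) (tensor_model_parallel_size : Int) : List (List Int) :=
  let num := PySem.Int.floordiv world_size tensor_model_parallel_size
  let groups := (PySem.List.pyRange 0 num 1).map (fun _ => ([] : List Int))
  (PySem.List.pyRange 0 world_size 1).foldl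
    (fun gs r => gs.modify (PySem.Int.floordiv r tensor_model_parallel_size).toNat (fun g => g ++ [r]))
    groups

-- ===== PRECONDITION & SPEC =====
-- Pre_ excludes tps = 0 (both programs raise ZeroDivisionError) and negative tps with
-- positive world_size, where A returns [] but B's scatter pass raises IndexError.
def Pre_generate_tensor_model_parallel_groups (world_size : Int) (tensor_model_parallel_size : Int) : Prop :=
  PySem.Int.mod world_size tensor_model_parallel_size = 0 ∧
    (0 < tensor_model_parallel_size ∨ (tensor_model_parallel_size < 0 ∧ world_size ≤ 0))

instance (world_size : Int) (tensor_model_parallel_size : Int) : Decidable (Pre_generate_tensor_model_parallel_groups world_size tensor_model_parallel_size) := by unfold Pre_generate_tensor_model_parallel_groups; infer_instance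

def pvWitness_generate_tensor_model_parallel_groups : Int × Int := (8, 2)

def Spec_generate_tensor_model_parallel_groups (world_size : Int) (tensor_model_parallel_size : Int) (out : List (List Int)) : Prop := out = generate_tensor_model_parallel_groups_alt world_size tensor_model_parallel_size
instance (world_size : Int) (tensor_model_parallel_size : Int) (out : List (List Int)) : Decidable (Spec_generate_tensor_model_parallel_groups world_size tensor_model_parallel_size out) := by unfold Spec_generate_tensor_model_parallel_groups; infer_instance

-- ===== CLAIM (what is proved, stated in full; the proofs are below) =====
def Claim_equal_generate_tensor_model_parallel_groups : Prop := ∀ (world_size : Int) (tensor_model_parallel_size : Int), Dom_generate_tensor_model_parallel_groups world_size tensor_model_parallel_size → Pre_generate_tensor_model_parallel_groups world_size tensor_model_parallel_size → Spec_generate_tensor_model_parallel_groups world_size tensor_model_parallel_size (generate_tensor_model_parallel_groups world_size tensor_model_parallel_size)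

-- ===== LEMMAS AND PROOFS =====

-- modify at the same index twice composes
lemma modify_modify_same {α : Type} (l : List α) (k : Nat) (f g : α → α) :
    (l.modify k f).modify k g = l.modify k (fun x => g (f x)) := by
  apply List.ext_getElem
  · simp
  · intro j h1 h2
    simp only [List.getElem_modify]
    split_ifs <;> rfl

-- folding a chunk whose every element lands in bucket k appends the whole chunk to bucket k
lemma chunk_fold (t : Int) (k : Nat) (l : List Int)
    (hl : ∀ r ∈ l, (PySem.Int.floordiv r t).toNat = k) (gs : List (List Int)) :
    l.foldl (fun gs r => gs.modify (PySem.Int.floordiv r t).toNat (fun g => g ++ [r])) gs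
      = gs.modify k (fun g => g ++ l) := by
  induction l generalizing gs with
  | nil =>
    simp only [List.foldl_nil, List.append_nil]
    apply List.ext_getElem
    · simp
    · intro j h1 h2
      simp only [List.getElem_modify]
      split_ifs <;> rfl
  | cons x l ih =>
    simp only [List.foldl_cons]
    rw [hl x (by simp), ih (fun r hr => hl r (by simp [hr])), modify_modify_same]
    simp

-- every rank in [k*t, (k+1)*t) has bucket index k
lemma bucket_of_mem (t : Int) (ht : 0 < t) (k : Nat) (r : Int)
    (hr : r ∈ PySem.List.pyRange ((k : Int) * t) (((k : Int) + 1) * t) 1) :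
    (PySem.Int.floordiv r t).toNat = k := by
  rw [PySem.List.mem_pyRange_one] at hr
  have h := (PySem.Int.floordiv_eq_iff_of_pos ht).mpr ⟨hr.1, hr.2⟩
  rw [h]; simp

-- the scatter fold over ranks 0 … n*t-1 appends chunk i to bucket i, for every start state
lemma scatter_fold (t : Int) (ht : 0 < t) (n : Nat) (gs : List (List Int)) :
    (PySem.List.pyRange 0 ((n : Int) * t) 1).foldl
        (fun gs r => gs.modify (PySem.Int.floordiv r t).toNat (fun g => g ++ [r])) gs
      = gs.mapIdx (fun i g =>
          if i < n then g ++ PySem.List.pyRange ((i : Int) * t) (((i : Int) + 1) * t) 1 else g) := by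
  induction n generalizing gs with
  | zero =>
    rw [PySem.List.pyRange_one_eq_nil (by simp)]
    simp only [List.foldl_nil]
    apply List.ext_getElem
    · simp
    · intro j h1 h2; simp [List.getElem_mapIdx]
  | succ n ih =>
    have hsplit : PySem.List.pyRange 0 (((n : Nat) + 1 : Int) * t) 1
        = PySem.List.pyRange 0 ((n : Int) * t) 1
          ++ PySem.List.pyRange ((n : Int) * t) (((n : Int) + 1) * t) 1 := by
      exact PySem.List.pyRange_one_append 0 ((n : Int) * t) (((n : Int) + 1) * t)
        (by positivity) (by nlinarith)
    rw [show ((n + 1 : Nat) : Int) = ((n : Nat) + 1 : Int) by push_cast; ring] at *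
    rw [hsplit, List.foldl_append, ih,
        chunk_fold t n _ (fun r hr => bucket_of_mem t ht n r hr)]
    apply List.ext_getElem
    · simp
    · intro j h1 h2
      simp only [List.getElem_modify, List.getElem_mapIdx]
      rcases lt_trichotomy j n with h | h | h
      · rw [if_neg (by omega), if_pos h, if_pos (by omega)]
      · subst h
        rw [if_pos rfl, if_neg (by omega), if_pos (by omega)]
      · rw [if_neg (by omega), if_neg (by omega), if_neg (by omega)]

-- A's fold-append loop is a map over the group indices
lemma portA_eq_map (world_size t : Int) :
    generate_tensor_model_parallel_groups world_size t
      = (PySem.List.pyRange 0 (PySem.Int.floordiv world_size t) 1).map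
          (fun i => PySem.List.pyRange (i * t) ((i + 1) * t) 1) := by
  unfold generate_tensor_model_parallel_groups
  simpa using PySem.List.foldl_append_singleton_eq_map
    (fun i => PySem.List.pyRange (i * t) ((i + 1) * t) 1)
    (PySem.List.pyRange 0 (PySem.Int.floordiv world_size t) 1) []

-- ===== VERDICT (by name: the statement is the Claim_ definition above) =====
theorem generate_tensor_model_parallel_groups_spec : Claim_equal_generate_tensor_model_parallel_groups := by
  intro ws t _ hpre
  obtain ⟨hdvd, hcase⟩ := hpre
  unfold Spec_generate_tensor_model_parallel_groups
  unfold generate_tensor_model_parallel_groups_alt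
  rw [portA_eq_map]
  rcases hcase with ht | ⟨ht, hwsneg⟩
  case inr =>
    -- tps < 0 and world_size ≤ 0: no ranks to scatter, and every one of A's ranges is empty
    rw [PySem.List.pyRange_one_eq_nil hwsneg]
    simp only [List.foldl_nil]
    refine List.map_congr_left (fun i _ => ?_)
    exact PySem.List.pyRange_one_eq_nil (by nlinarith)
  rcases le_or_gt ws 0 with hws | hws
  · -- world_size ≤ 0: num ≤ 0, both sides are built from empty ranges
    have hnum : PySem.Int.floordiv ws t ≤ 0 := by
      rw [PySem.Int.floordiv_eq_ediv_of_pos ht]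
      simpa using Int.ediv_le_ediv ht hws
    rw [PySem.List.pyRange_one_eq_nil hnum, PySem.List.pyRange_one_eq_nil hws]
    simp
    all_goals assumption
  · -- world_size > 0: ws = n * t with n = num.toNat
    have hdvd' : t ∣ ws := (PySem.Int.mod_eq_zero_iff_dvd ws t).mp hdvd
    set num := PySem.Int.floordiv ws t with hnumdef
    obtain ⟨c, hc⟩ := hdvd'
    have hnum_eq : num = c := by
      rw [hnumdef, PySem.Int.floordiv_eq_ediv_of_pos ht, hc,
          Int.mul_ediv_cancel_left c (by omega)]
    have hc_pos : 0 < c := by nlinarith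
    have hws_eq : ws = (num.toNat : Int) * t := by
      rw [Int.toNat_of_nonneg (by omega), hnum_eq, hc]; ring
    rw [hws_eq, scatter_fold t ht num.toNat]
    apply List.ext_getElem
    · simp [PySem.List.length_pyRange_one]
    · intro j h1 h2
      have hj : j < num.toNat := by
        simpa [PySem.List.length_pyRange_one] using h1
      rw [List.getElem_map, List.getElem_mapIdx, List.getElem_map,
          PySem.List.getElem_pyRange_one]
      rw [if_pos (by simpa [PySem.List.length_pyRange_one] using hj)]
      simp
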